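-- pv_equiv track=rewrite | github.com/undeemed/SEC-Tracker | track_form4.py | group_transactions_by_person
-- ===== SOURCE A (Python) =====
-- from typing import List, Dict, Optional, Tuple
--
-- def group_transactions_by_person(transactions: List[Dict]) -> Dict[str, List[Dict]]:
--     """Group transactions by person (owner_name + role)"""
--     grouped = {}
--     for trans in transactions:
--         key = f"{trans['owner_name']}|{trans['role']}"
--         if key not in grouped:
--             grouped[key] = []
--         grouped[key].append(trans)
--     return grouped
-- ===== SOURCE B (Python) =====
-- from typing import List, Dict, Optional, Tuple
--
-- def group_transactions_by_person(transactions: List[Dict]) -> Dict[str, List[Dict]]: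
--     """Group transactions by person (owner_name + role).
--
--     Two-pass decomposition: first collect the distinct keys in order of first
--     appearance, then build each group by filtering the input once per key."""
--     keys = []
--     for trans in transactions:
--         key = f"{trans['owner_name']}|{trans['role']}"
--         if key not in keys:
--             keys.append(key)
--     return {key: [t for t in transactions
--                   if f"{t['owner_name']}|{t['role']}" == key]
--             for key in keys}
-- ===== Notes on version B (the rewrite author's own statement) =====
-- stated objective: alternative
-- what changed: Replaces A's single-pass dict bucketing (create-empty-then-append per element) with a two-pass scheme: one pass collects the distinct owner|role keys in first-appearance order, then a dict comprehension builds each group by filtering the whole input per key.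
import Mathlib
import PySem

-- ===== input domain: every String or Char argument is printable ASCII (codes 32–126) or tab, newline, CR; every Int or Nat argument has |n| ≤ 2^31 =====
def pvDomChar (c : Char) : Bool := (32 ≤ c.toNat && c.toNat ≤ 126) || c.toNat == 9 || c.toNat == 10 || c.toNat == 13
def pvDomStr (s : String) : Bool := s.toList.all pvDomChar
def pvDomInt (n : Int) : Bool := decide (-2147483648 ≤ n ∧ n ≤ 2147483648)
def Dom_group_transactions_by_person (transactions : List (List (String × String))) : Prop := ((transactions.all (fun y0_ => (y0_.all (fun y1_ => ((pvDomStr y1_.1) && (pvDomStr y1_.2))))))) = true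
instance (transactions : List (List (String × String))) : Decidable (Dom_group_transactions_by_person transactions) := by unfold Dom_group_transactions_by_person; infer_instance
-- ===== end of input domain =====

-- B groups by a different decomposition: distinct keys in first-appearance order, then one filter per key
-- (objective: alternative); A buckets on the fly into a dict. Return values proved equal wherever A returns.


-- ===== PORT A =====
-- key = f"{trans['owner_name']}|{trans['role']}"; the .getD "" fallback is never taken inside
-- Pre_ (both lookups are some there; in Python a missing key raises KeyError, excluded by Pre_).
def pvKeyOf (t : List (String × String)) : String :=
  ((PySem.Dict.mk t).get? "owner_name").getD "" ++ "|" ++ ((PySem.Dict.mk t).get? "role").getD ""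

def group_transactions_by_person (transactions : List (List (String × String))) : List (String × List (List (String × String))) :=
  (transactions.foldl
    (fun grouped trans =>
      let key := pvKeyOf trans
      let grouped' := if grouped.contains key then grouped
                      else grouped.insert key ([] : List (List (String × String)))
      grouped'.modify key [] (fun l => l ++ [trans]))
    (PySem.Dict.empty : PySem.Dict String (List (List (String × String))))).items

-- ===== PORT B =====
def group_transactions_by_person_alt (transactions : List (List (String × String))) : List (String × List (List (String × String))) :=
  let keys : PySem.Set String :=
    transactions.foldl (fun ks t => PySem.Set.add ks (pvKeyOf t)) PySem.Set.empty
  keys.map (fun k => (k, transactions.filter (fun t => pvKeyOf t == k)))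

-- ===== PRECONDITION & SPEC =====
-- Pre_ excludes exactly the inputs where Python A raises KeyError: a transaction missing the
-- 'owner_name' or 'role' key (B raises there too).
def Pre_group_transactions_by_person (transactions : List (List (String × String))) : Prop :=
  ∀ t ∈ transactions, ((PySem.Dict.mk t).get? "owner_name").isSome = true ∧ ((PySem.Dict.mk t).get? "role").isSome = true
instance (transactions : List (List (String × String))) : Decidable (Pre_group_transactions_by_person transactions) := by unfold Pre_group_transactions_by_person; infer_instance

def pvWitness_group_transactions_by_person : (List (List (String × String))) :=
  [[("owner_name", "Jane Doe"), ("role", "CEO")], [("owner_name", "Jane Doe"), ("role", "CFO")]]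

def Spec_group_transactions_by_person (transactions : List (List (String × String))) (out : List (String × List (List (String × String)))) : Prop := out = group_transactions_by_person_alt transactions
instance (transactions : List (List (String × String))) (out : List (String × List (List (String × String)))) : Decidable (Spec_group_transactions_by_person transactions out) := by unfold Spec_group_transactions_by_person; infer_instance

-- ===== CLAIM (what is proved, stated in full; the proofs are below) =====
def Claim_equal_group_transactions_by_person : Prop := ∀ (transactions : List (List (String × String))), Dom_group_transactions_by_person transactions → Pre_group_transactions_by_person transactions → Spec_group_transactions_by_person transactions (group_transactions_by_person transactions)

-- ===== LEMMAS AND PROOFS =====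

-- Overwriting a just-inserted fresh key in place is one insert.
theorem pv_insert_insert_self {ν : Type} (g : PySem.Dict String ν) (k : String) (u v : ν)
    (h : g.contains k = false) : (g.insert k u).insert k v = g.insert k v := by
  apply PySem.Dict.ext
  rw [PySem.Dict.items_insert_of_contains _ _ (PySem.Dict.contains_insert_self g k u),
      PySem.Dict.items_insert_of_not_contains _ _ h,
      PySem.Dict.items_insert_of_not_contains _ _ h,
      List.map_append]
  have hk : ∀ p ∈ g.items, (p.1 == k) = false := by
    intro p hp
    have hkm : k ∉ g.keys := by
      intro hm; rw [← PySem.Dict.contains_iff_mem_keys] at hm; simp [h] at hm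
    simp only [PySem.Dict.keys] at hkm
    by_contra hb
    simp only [Bool.not_eq_false, beq_iff_eq] at hb
    exact hkm (hb ▸ List.mem_map_of_mem hp)
  rw [List.map_congr_left (fun p hp => by simp [hk p hp] : ∀ p ∈ g.items, (fun p => if (p.1 == k) = true then (k, v) else p) p = id p)]
  simp

-- A's "if key not in grouped: grouped[key] = []" followed by the append is one modify.
theorem pv_step_eq {ν : Type} (g : PySem.Dict String ν) (k : String) (dflt : ν) (f : ν → ν) :
    (if g.contains k then g else g.insert k dflt).modify k dflt f = g.modify k dflt f := by
  by_cases h : g.contains k = true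
  · simp [h]
  · simp only [Bool.not_eq_true] at h
    simp only [h, if_neg Bool.false_ne_true]
    unfold PySem.Dict.modify
    rw [PySem.Dict.getD_insert_self, PySem.Dict.getD_of_not_contains _ _ h,
        pv_insert_insert_self _ _ _ _ h]

theorem pv_ab_eq (ts : List (List (String × String))) :
    group_transactions_by_person ts = group_transactions_by_person_alt ts := by
  unfold group_transactions_by_person group_transactions_by_person_alt
  simp only [pv_step_eq]
  set F := ts.foldl (fun d t => d.modify (pvKeyOf t) [] (fun l => l ++ [t]))
      (PySem.Dict.empty : PySem.Dict String (List (List (String × String)))) with hF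
  have hnd : F.keys.Nodup := by
    rw [hF]
    exact PySem.Dict.nodup_keys_foldl_modify_key ts pvKeyOf [] (fun _ t l => l ++ [t]) _
      (by simp [PySem.Dict.keys_empty])
  have hkeys : F.keys = PySem.Set.ofList (ts.map pvKeyOf) := by
    rw [hF, PySem.Dict.keys_foldl_modify_key ts pvKeyOf [] (fun _ t l => l ++ [t])]
    simp [PySem.Dict.keys_empty, PySem.Set.update_nil_left]
  have hgetD : ∀ c, F.getD c [] = ts.filter (fun t => pvKeyOf t == c) := by
    intro c
    have : F = (ts.map (fun t => (pvKeyOf t, t))).foldl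
        (fun d p => d.modify p.1 [] (fun l => l ++ [p.2])) PySem.Dict.empty := by
      rw [hF, List.foldl_map]
    rw [this, PySem.Dict.getD_foldl_modify_append]
    simp [PySem.Dict.getD_empty, List.filter_map, Function.comp_def]
  rw [PySem.Dict.items_eq_map_keys F hnd [], hkeys,
      ← PySem.Set.update_map_eq_foldl_add]
  simp only [PySem.Set.update_empty]
  exact List.map_congr_left (fun k _ => by rw [hgetD k])

-- ===== VERDICT (by name: the statement is the Claim_ definition above) =====
theorem group_transactions_by_person_spec : Claim_equal_group_transactions_by_person := by
  intro ts _ _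
  unfold Spec_group_transactions_by_person
  exact pv_ab_eq ts
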